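-- pv_equiv track=rewrite | github.com/gustin33/project_euler | 001-100/problem091_unfinished/main.py | square_digit_list_1
-- ===== SOURCE A (Python) =====
-- import itertools
--
-- def sum_squares_num(n):
--     s = 0
--     for digit in list(map(int, list(str(n)))):
--         s += digit**2
--     return s
--
-- def square_digit(x):
--     if x == 1:
--         return 1  # 1 can be used as a boolean value "True"
--     elif x == 89:
--         return 0  # 0 can be used as a False boolean value, as well
--     else:
--         return square_digit(sum_squares_num(x))
--
-- def square_digit_list_1(n):  # returns a list of numbers <= n which end in 1
--     flags = [0]*(n+1)  # list representing all numbers going to 1 (value 1) or 89 (value 0)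
--     for number in range(1, n+1):
--         num = int("".join([digit for digit in list(str(number)) if digit != "0"]))  # This code filters 0´s out of
--         if square_digit(num) and flags[num] == 0:  # if the number is possibly not a permutation of a smaller one
--                 # the number, given that they do not contribute to the addition of squares.
--                 digits = list(str(number))  # We use here number and num, since we want to eliminate all possibilities
--                 digitss = list(str(num))
--                 permutations_of_num = list(itertools.permutations(digitss, len(digitss)))
--                 permutations_of_number = list(itertools.permutations(digits, len(digits)))  # ,including and excluding 0´s.
--                 all_permutations = permutations_of_num + permutations_of_number
--                 for perm in [int("".join(perm)) for perm in all_permutations]: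
--                     if perm < n + 1:  # These lines of code sets all permutations of num to 1 in flags, provided
--                         flags[perm] = 1  # they´re less than n+1.
--     return sum(flags)
-- ===== SOURCE B (Python) =====
-- def square_digit_list_1(n):  # returns a list of numbers <= n which end in 1
--     # Direct single pass: A's permutation/flag machinery marks exactly the
--     # numbers <= n that contain no digit 0 and whose square-digit chain ends in 1
--     # (numbers containing a 0 are never marked: their zero-stripped form is
--     # always flagged first). So count those directly, with an iterative chain.
--     count = 0
--     for m in range(1, n + 1):
--         s = str(m)
--         if '0' in s:
--             continue
--         x = m
--         while x != 1 and x != 89: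
--             x = sum(int(d) ** 2 for d in str(x))
--         if x == 1:
--             count += 1
--     return count
-- ===== Notes on version B (the rewrite author's own statement) =====
-- stated objective: faster
-- what changed: Replaced the flags array, the recursive chain function and the per-number itertools.permutations marking by a single pass that counts numbers without a zero digit whose iterative square-digit chain reaches 1 (provably the exact set A's marking process flags).
import Mathlib
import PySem

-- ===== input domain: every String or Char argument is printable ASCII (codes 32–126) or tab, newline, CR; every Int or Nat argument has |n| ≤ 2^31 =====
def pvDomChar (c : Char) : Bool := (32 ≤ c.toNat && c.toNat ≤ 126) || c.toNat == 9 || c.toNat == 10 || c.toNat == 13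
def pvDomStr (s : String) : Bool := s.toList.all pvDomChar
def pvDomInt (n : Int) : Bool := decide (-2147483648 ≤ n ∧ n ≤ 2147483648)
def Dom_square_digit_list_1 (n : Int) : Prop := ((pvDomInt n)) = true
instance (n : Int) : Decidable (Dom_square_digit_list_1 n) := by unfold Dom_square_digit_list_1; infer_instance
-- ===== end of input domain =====

-- B replaces A's flags array + recursive chain + itertools.permutations marking by one
-- counting pass over 1..n (numbers without a zero digit whose square-digit chain reaches 1);
-- measurably faster by a constant factor (no permutation generation, iterative chain).

-- ===== PORT A =====
-- int(d) for a single digit character d (exact there: all characters fed to int() here are '0'-'9')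
def pvDigitVal (c : Char) : Int := (c.toNat : Int) - 48
-- int("".join(ds)) for a nonempty list of digit characters (exact there: Python's int of a
-- pure digit string is this base-10 fold; leading zeros contribute nothing to the fold, as in Python)
def pvCharsVal (ds : List Char) : Int := ds.foldl (fun a c => 10 * a + pvDigitVal c) 0

def sumSquaresNum (x : Int) : Int :=
  (PySem.Int.toChars x).foldl (fun s d => s + pvDigitVal d ^ 2) 0

-- square_digit: Python's unbounded recursion, totalized with a fuel guard. Fuel 101 is never
-- exhausted on the arguments arising here (positive ints ≤ 2^31, whose chain enters {1, 89}
-- within a few dozen steps); the guard only makes the recursion structural.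
def squareDigit : Nat → Int → Int
  | 0, _ => 0
  | f + 1, x => if x = 1 then 1 else if x = 89 then 0 else squareDigit f (sumSquaresNum x)

-- the body of A's main loop (one iteration for `number`), named so the fold can use it
def squareDigitList1Step (n : Int) (flags : List Int) (number : Int) : List Int :=
  let num : Int := pvCharsVal ((PySem.Int.toChars number).filter (fun d => d != '0'))
  -- flags[num]: the index is always in range (0 ≤ num ≤ number ≤ n), so the default is never read
  if squareDigit 101 num ≠ 0 ∧ PySem.List.pyGetD flags num 0 = 0 then
    let digits := PySem.Int.toChars number
    let digitss := PySem.Int.toChars num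
    let permutationsOfNum := PySem.List.permutations digitss digitss.length
    let permutationsOfNumber := PySem.List.permutations digits digits.length
    let allPermutations := permutationsOfNum ++ permutationsOfNumber
    -- flags[perm] = 1: the index is in range whenever perm < n + 1 (perm ≥ 0 always)
    (allPermutations.map (fun p => pvCharsVal p)).foldl
      (fun fl perm => if perm < n + 1 then PySem.List.pySetD fl perm 1 else fl) flags
  else flags

def square_digit_list_1 (n : Int) : Int :=
  ((PySem.List.pyRange 1 (n + 1) 1).foldl (squareDigitList1Step n)
      (List.replicate (n + 1).toNat 0)).foldl (· + ·) 0

-- ===== PORT B =====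
-- sum(int(d) ** 2 for d in str(x))
def pvChainStep (x : Int) : Int :=
  ((PySem.Int.toChars x).map (fun d => pvDigitVal d ^ 2)).sum

-- the while loop of Source B, totalized with a fuel guard (100: never exhausted on the
-- values reached here, see the note on squareDigit); returns the final x
def pvChainLoop : Nat → Int → Int
  | 0, x => x
  | f + 1, x => if x ≠ 1 ∧ x ≠ 89 then pvChainLoop f (pvChainStep x) else x

def square_digit_list_1_alt (n : Int) : Int :=
  (PySem.List.pyRange 1 (n + 1) 1).foldl (fun count m =>
    if (PySem.Int.toChars m).contains '0' then count
    else if pvChainLoop 100 m = 1 then count + 1 else count) 0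

-- ===== PRECONDITION & SPEC =====
def Spec_square_digit_list_1 (n : Int) (out : Int) : Prop := out = square_digit_list_1_alt n
instance (n : Int) (out : Int) : Decidable (Spec_square_digit_list_1 n out) := by unfold Spec_square_digit_list_1; infer_instance

-- ===== CLAIM (what is proved, stated in full; the proofs are below) =====
def Claim_equal_square_digit_list_1 : Prop := ∀ (n : Int), Dom_square_digit_list_1 n → Spec_square_digit_list_1 n (square_digit_list_1 n)

-- ===== LEMMAS AND PROOFS =====

-- a digit character '0'..'9'
abbrev isDig (c : Char) : Prop := 48 ≤ c.toNat ∧ c.toNat ≤ 57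
def dval (c : Char) : Nat := c.toNat - 48
-- v has no digit 0
abbrev zfree (v : Int) : Prop := '0' ∉ PySem.Int.toChars v
-- v's square-digit chain reaches 1 (as B computes it)
abbrev happyB (v : Int) : Prop := pvChainLoop 100 v = 1
-- the values of all digit-permutations of v
def classVals (v : Int) : List Int :=
  (PySem.List.permutations (PySem.Int.toChars v) (PySem.Int.toChars v).length).map pvCharsVal
-- the least such value
def mcv (v : Int) : Int := (classVals v).foldl min v
-- the value A's flags array holds at index u once numbers 1..k have been processed
def indF (k u : Int) : Int :=
  if 1 ≤ u ∧ zfree u ∧ happyB u ∧ mcv u ≤ k then 1 else 0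
def InvF (n k : Int) (flags : List Int) : Prop :=
  flags.length = (n + 1).toNat ∧
    ∀ u : Int, 0 ≤ u → u ≤ n → PySem.List.pyGetD flags u 0 = indF k u

-- generic list facts
lemma foldl_add_eq_sum (l : List Int) : ∀ a : Int, l.foldl (· + ·) a = a + l.sum := by
  induction l with
  | nil => intro a; simp
  | cons x t ih => intro a; rw [List.foldl_cons, ih, List.sum_cons]; ring

lemma eq_map_getD (l : List Int) : l = (List.range l.length).map (fun i => l.getD i 0) := by
  induction l with
  | nil => rfl
  | cons a t ih =>
    simp only [List.length_cons, List.range_succ_eq_map, List.map_cons, List.map_map]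
    refine congrArg₂ _ rfl ?_
    conv_lhs => rw [ih]
    exact List.map_congr_left (fun i _ => rfl)

lemma getD_set' (l : List Int) (i : Nat) (v : Int) (j : Nat) :
    (l.set i v).getD j 0 = if i = j ∧ i < l.length then v else l.getD j 0 := by
  by_cases hij : i = j
  · subst hij
    by_cases hlt : i < l.length
    · simp [List.getD_eq_getElem?_getD, hlt]
    · simp [List.getD_eq_getElem?_getD, hlt]
  · simp [List.getD_eq_getElem?_getD, hij]

lemma foldl_min_le_init (l : List Int) (a : Int) : l.foldl min a ≤ a := by
  induction l generalizing a with
  | nil => exact le_refl a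
  | cons x t ih => exact le_trans (ih (min a x)) (min_le_left a x)

lemma foldl_min_le_mem (l : List Int) (a x : Int) (h : x ∈ l) : l.foldl min a ≤ x := by
  induction l generalizing a with
  | nil => cases h
  | cons y t ih =>
    rcases List.mem_cons.mp h with rfl | hx
    · exact le_trans (foldl_min_le_init t (min a x)) (min_le_right a x)
    · exact ih (min a y) hx

lemma foldl_min_cases (l : List Int) (a : Int) : l.foldl min a = a ∨ l.foldl min a ∈ l := by
  induction l generalizing a with
  | nil => exact Or.inl rfl
  | cons x t ih =>
    rcases ih (min a x) with h | h
    · rcases min_choice a x with hm | hm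
      · left; rw [List.foldl_cons, h, hm]
      · right; rw [List.foldl_cons, h, hm]; exact List.mem_cons_self
    · exact Or.inr (List.mem_cons_of_mem x h)

lemma perm_pair {α : Type} (l : List α) (a b : α) (h : l.Perm [a, b]) : l = [a, b] ∨ l = [b, a] := by
  have hlen := h.length_eq
  match l, hlen with
  | [x, y], _ =>
    have hx : x ∈ [a, b] := h.mem_iff.mp (by simp)
    rcases List.mem_pair.mp hx with rfl | rfl
    · have : [y].Perm [b] := h.cons_inv
      exact Or.inl (by rw [List.perm_singleton.mp this])
    · have h2 : ([x, y]).Perm [x, a] := h.trans (List.Perm.swap x a [])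
      have : [y].Perm [a] := h2.cons_inv
      exact Or.inr (by rw [List.perm_singleton.mp this])

lemma mem_permutations_of_perm {α : Type} [DecidableEq α] (xs p : List α) (h : p.Perm xs) :
    p ∈ PySem.List.permutations xs xs.length := by
  induction p generalizing xs with
  | nil =>
    have : xs = [] := List.perm_nil.mp h.symm
    subst this
    show [] ∈ PySem.List.permutations ([] : List α) 0
    rw [PySem.List.permutations_zero]
    simp
  | cons a t ih =>
    have ha : a ∈ xs := h.mem_iff.mp (List.mem_cons_self)
    have hlen : xs.length = t.length + 1 := by
      have := h.length_eq; simpa using this.symm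
    have hperm : t.Perm (xs.erase a) :=
      (h.trans (List.perm_cons_erase ha)).cons_inv
    have hlen' : (xs.erase a).length = t.length := by
      rw [List.length_erase_of_mem ha, hlen]
      omega
    have hIH : t ∈ PySem.List.permutations (xs.erase a) (xs.erase a).length := ih _ hperm
    rw [hlen'] at hIH
    have herase : xs.eraseIdx (xs.idxOf a) = xs.erase a :=
      (List.erase_eq_eraseIdx_of_idxOf rfl).symm
    rw [hlen, PySem.List.permutations]
    apply List.mem_flatMap.mpr
    refine ⟨xs.idxOf a, List.mem_range.mpr (List.idxOf_lt_length_of_mem ha), ?_⟩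
    have hget : xs[xs.idxOf a]? = some a := by
      rw [List.getElem?_eq_getElem (List.idxOf_lt_length_of_mem ha)]
      rw [List.getElem_idxOf]
    rw [hget, herase]
    exact List.mem_map.mpr ⟨t, hIH, rfl⟩

-- str(v) ↔ Nat.digits bridge
lemma toDigitsCore_eq (f n : Nat) (h1 : 1 ≤ n) (h2 : n < f) (l : List Char) :
    Nat.toDigitsCore 10 f n l = ((Nat.digits 10 n).reverse.map Nat.digitChar) ++ l := by
  induction f generalizing n l with
  | zero => omega
  | succ f ih =>
    rw [Nat.toDigitsCore]
    have hdig : Nat.digits 10 n = n % 10 :: Nat.digits 10 (n / 10) :=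
      Nat.digits_def' (by norm_num) (by omega)
    by_cases hz : n / 10 = 0
    · simp [hz, hdig]
    · have hlt : n / 10 < n := Nat.div_lt_self (by omega) (by norm_num)
      simp only [hz, if_false]
      rw [ih (n / 10) (by omega) (by omega)]
      simp [hdig]

lemma toChars_eq (v : Int) (h : 1 ≤ v) :
    PySem.Int.toChars v = (Nat.digits 10 v.toNat).reverse.map Nat.digitChar := by
  have hneg : ¬ v < 0 := by omega
  show (if v < 0 then '-' :: Nat.toDigits 10 v.natAbs else Nat.toDigits 10 v.toNat) = _
  rw [if_neg hneg]
  unfold Nat.toDigits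
  rw [toDigitsCore_eq (v.toNat + 1) v.toNat (by omega) (by omega)]
  simp

lemma digitChar_isDig {d : Nat} (h : d < 10) : isDig (Nat.digitChar d) := by
  interval_cases d <;> decide

lemma dval_digitChar {d : Nat} (h : d < 10) : dval (Nat.digitChar d) = d := by
  interval_cases d <;> decide

lemma digitChar_eq_zero_iff {d : Nat} (h : d < 10) : Nat.digitChar d = '0' ↔ d = 0 := by
  interval_cases d <;> decide

lemma char_eq_of_toNat (c d : Char) (h : c.toNat = d.toNat) : c = d :=
  Char.ext (UInt32.toNat_inj.mp h)

lemma digitChar_dval (c : Char) (h : isDig c) : Nat.digitChar (dval c) = c := by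
  have h10 : dval c < 10 := by unfold dval; omega
  apply char_eq_of_toNat
  have h48 : (Nat.digitChar (dval c)).toNat = 48 + dval c := by
    interval_cases h : dval c <;> decide
  rw [h48]; unfold dval; omega

lemma toChars_ne_nil (v : Int) (h : 1 ≤ v) : PySem.Int.toChars v ≠ [] := by
  rw [toChars_eq v h]
  simp [Nat.digits_ne_nil_iff_ne_zero]
  omega

lemma toChars_isDig (v : Int) (h : 1 ≤ v) : ∀ c ∈ PySem.Int.toChars v, isDig c := by
  rw [toChars_eq v h]
  intro c hc
  obtain ⟨d, hd, rfl⟩ := List.mem_map.mp hc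
  exact digitChar_isDig (Nat.digits_lt_base (by norm_num) (List.mem_reverse.mp hd))

lemma toChars_head_ne_zero (v : Int) (h : 1 ≤ v) (c : Char)
    (hc : (PySem.Int.toChars v).head? = some c) : c ≠ '0' := by
  rw [toChars_eq v h] at hc
  have hnn : Nat.digits 10 v.toNat ≠ [] := by
    simp [Nat.digits_ne_nil_iff_ne_zero]; omega
  have hrn : (Nat.digits 10 v.toNat).reverse ≠ [] := by simpa using hnn
  have hmn : ((Nat.digits 10 v.toNat).reverse.map Nat.digitChar) ≠ [] := by simpa using hrn
  rw [List.head?_eq_some_head hmn] at hc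
  have hc' : c = Nat.digitChar ((Nat.digits 10 v.toNat).reverse.head hrn) := by
    rw [← Option.some_inj, ← hc]
    rw [List.head_map]
  have hmem : (Nat.digits 10 v.toNat).reverse.head hrn ∈ Nat.digits 10 v.toNat :=
    List.mem_reverse.mp (List.head_mem hrn)
  have hlt : (Nat.digits 10 v.toNat).reverse.head hrn < 10 :=
    Nat.digits_lt_base (by norm_num) hmem
  have hne : (Nat.digits 10 v.toNat).reverse.head hrn ≠ 0 := by
    rw [List.head_reverse]
    exact Nat.getLast_digit_ne_zero 10 (by omega)
  rw [hc']
  intro hbad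
  exact hne ((digitChar_eq_zero_iff hlt).mp hbad)

-- value lemmas
lemma pvCharsVal_eq_ofDigits (ds : List Char) (h : ∀ c ∈ ds, isDig c) :
    pvCharsVal ds = ((Nat.ofDigits 10 (ds.reverse.map dval) : ℕ) : Int) := by
  induction ds using List.reverseRecOn with
  | nil => simp [pvCharsVal, Nat.ofDigits_nil]
  | append_singleton ds c ih =>
    have hds : ∀ x ∈ ds, isDig x := fun x hx => h x (by simp [hx])
    have hc : isDig c := h c (by simp)
    unfold pvCharsVal at ih ⊢
    rw [List.foldl_append, List.foldl_cons, List.foldl_nil, ih hds,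
      List.reverse_append]
    simp only [List.reverse_cons, List.reverse_nil, List.nil_append,
      List.singleton_append, List.map_cons, Nat.ofDigits_cons]
    have h48 : 48 ≤ c.toNat := hc.1
    unfold pvDigitVal dval
    push_cast [h48]
    ring

lemma val_toChars (v : Int) (h : 1 ≤ v) : pvCharsVal (PySem.Int.toChars v) = v := by
  rw [pvCharsVal_eq_ofDigits _ (toChars_isDig v h), toChars_eq v h]
  simp only [List.map_reverse, List.reverse_reverse, List.map_map, Function.comp_def]
  have hmap : (Nat.digits 10 v.toNat).map (fun d => dval (Nat.digitChar d)) = Nat.digits 10 v.toNat := by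
    rw [List.map_congr_left (fun d hd =>
      dval_digitChar (Nat.digits_lt_base (by norm_num) hd)), List.map_id_fun']
    rfl
  rw [hmap, Nat.ofDigits_digits]
  omega

lemma toChars_val (ds : List Char) (h1 : ds ≠ []) (h2 : ∀ c ∈ ds, isDig c)
    (h3 : ds.head h1 ≠ '0') :
    1 ≤ pvCharsVal ds ∧ PySem.Int.toChars (pvCharsVal ds) = ds := by
  set L : List Nat := ds.reverse.map dval with hL
  have hrn : ds.reverse ≠ [] := by simpa using h1
  have hLnil : L ≠ [] := by simp [hL, h1]
  have hLlt : ∀ d ∈ L, d < 10 := by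
    intro d hd
    obtain ⟨c, hc, rfl⟩ := List.mem_map.mp hd
    have := h2 c (List.mem_reverse.mp hc)
    unfold dval; omega
  have hlast : ∀ (hh : L ≠ []), L.getLast hh ≠ 0 := by
    intro hh
    have hq : L.getLast? = some (dval (ds.head h1)) := by
      rw [hL, List.getLast?_map, List.getLast?_reverse, List.head?_eq_some_head h1]
      rfl
    rw [List.getLast?_eq_some_getLast hh] at hq
    rw [Option.some_inj.mp hq]
    intro hz
    apply h3
    have hd := h2 (ds.head h1) (List.head_mem h1)
    apply char_eq_of_toNat
    unfold dval at hz
    have h48' : (ds.head h1).toNat = 48 := by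
      have := hd.1; omega
    simp [h48']
  have hdig : Nat.digits 10 (Nat.ofDigits 10 L) = L := Nat.digits_ofDigits 10 (by norm_num) L hLlt hlast
  have hpos : Nat.ofDigits 10 L ≠ 0 := by
    intro hz
    rw [hz] at hdig
    simp at hdig
    exact hLnil hdig
  have hval : pvCharsVal ds = ((Nat.ofDigits 10 L : Nat) : Int) := pvCharsVal_eq_ofDigits ds h2
  constructor
  · rw [hval]; exact_mod_cast Nat.one_le_iff_ne_zero.mpr hpos
  · rw [hval, toChars_eq _ (by exact_mod_cast Nat.one_le_iff_ne_zero.mpr hpos)]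
    rw [Int.toNat_natCast, hdig, hL]
    simp only [List.map_reverse, List.reverse_reverse, List.map_map, Function.comp_def]
    rw [List.map_congr_left (fun c hc => digitChar_dval c (h2 c hc)), List.map_id_fun']
    rfl

lemma val_lt (ds : List Char) (h : ∀ c ∈ ds, isDig c) :
    pvCharsVal ds < (10 : Int) ^ ds.length := by
  rw [pvCharsVal_eq_ofDigits ds h]
  have hlt : Nat.ofDigits 10 (ds.reverse.map dval) < 10 ^ (ds.reverse.map dval).length := by
    apply Nat.ofDigits_lt_base_pow_length (by norm_num)
    intro d hd
    obtain ⟨c, hc, rfl⟩ := List.mem_map.mp hd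
    have := h c (List.mem_reverse.mp hc)
    unfold dval; omega
  have hlen : (ds.reverse.map dval).length = ds.length := by simp
  rw [hlen] at hlt
  exact_mod_cast hlt

lemma le_of_toChars_len (v : Int) (h : 1 ≤ v) :
    (10 : Int) ^ ((PySem.Int.toChars v).length - 1) ≤ v := by
  have hlen : (PySem.Int.toChars v).length = (Nat.digits 10 v.toNat).length := by
    rw [toChars_eq v h]; simp
  set L := (Nat.digits 10 v.toNat).length with hLdef
  have hL1 : 1 ≤ L := by
    rw [hLdef]
    have : Nat.digits 10 v.toNat ≠ [] := by
      simp [Nat.digits_ne_nil_iff_ne_zero]; omega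
    exact List.length_pos_iff.mpr this
  have hnot : ¬ (v.toNat < 10 ^ (L - 1)) := by
    intro hlt
    have := (Nat.digits_length_le_iff (by norm_num) v.toNat).mpr hlt
    omega
  have : 10 ^ (L - 1) ≤ v.toNat := by omega
  rw [hlen]
  calc (10 : Int) ^ (L - 1) = ((10 ^ (L - 1) : Nat) : Int) := by push_cast; ring
    _ ≤ (v.toNat : Int) := by exact_mod_cast this
    _ = v := by omega

-- chain lemmas
lemma ssn_eq_chainStep (x : Int) : sumSquaresNum x = pvChainStep x := by
  unfold sumSquaresNum pvChainStep
  rw [List.sum_eq_foldl, List.foldl_map]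

lemma squareDigit_eq (f : Nat) (x : Int) :
    squareDigit (f + 1) x = if pvChainLoop f x = 1 then 1 else 0 := by
  induction f generalizing x with
  | zero =>
    show (if x = 1 then 1 else if x = 89 then 0 else squareDigit 0 (sumSquaresNum x)) = _
    show _ = if x = 1 then (1 : Int) else 0
    by_cases h1 : x = 1
    · simp [h1]
    · by_cases h89 : x = 89 <;> simp [h1, h89, squareDigit]
  | succ f ih =>
    show (if x = 1 then 1 else if x = 89 then 0 else squareDigit (f + 1) (sumSquaresNum x)) = _
    by_cases h1 : x = 1
    · simp [h1, pvChainLoop]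
    · by_cases h89 : x = 89
      · simp [h89, pvChainLoop]
      · rw [if_neg h1, if_neg h89, ih (sumSquaresNum x)]
        have : pvChainLoop (f + 1) x = pvChainLoop f (pvChainStep x) := by
          show (if x ≠ 1 ∧ x ≠ 89 then _ else x) = _
          rw [if_pos ⟨h1, h89⟩]
        rw [this, ssn_eq_chainStep]

lemma chainStep_congr (u v : Int) (h : (PySem.Int.toChars u).Perm (PySem.Int.toChars v)) :
    pvChainStep u = pvChainStep v := by
  exact List.Perm.sum_eq (h.map _)

lemma pair_cases (v : Int) (hv : 1 ≤ v) (a b : Char)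
    (h : (PySem.Int.toChars v).Perm [a, b]) :
    v = pvCharsVal [a, b] ∨ v = pvCharsVal [b, a] := by
  rcases perm_pair _ a b h with hcase | hcase
  · left; rw [← val_toChars v hv, hcase]
  · right; rw [← val_toChars v hv, hcase]

lemma happy_congr (u v : Int) (hu : 1 ≤ u) (hv : 1 ≤ v)
    (h : (PySem.Int.toChars u).Perm (PySem.Int.toChars v)) : happyB u ↔ happyB v := by
  unfold happyB
  by_cases h1 : u = 1
  · subst h1
    have hv1 : PySem.Int.toChars v = ['1'] := List.perm_singleton.mp (h.symm)
    have : v = 1 := by rw [← val_toChars v hv, hv1]; rfl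
    rw [this]
  · by_cases hv1 : v = 1
    · subst hv1
      have hu1 : PySem.Int.toChars u = ['1'] := List.perm_singleton.mp h
      have : u = 1 := by rw [← val_toChars u hu, hu1]; rfl
      exact absurd this h1
    · by_cases h89 : u = 89
      · subst h89
        have h2 : (PySem.Int.toChars v).Perm ['8', '9'] := h.symm
        rcases pair_cases v hv '8' '9' h2
          with hc | hc
        · rw [hc]; decide
        · rw [hc]; decide
      · by_cases hv89 : v = 89
        · subst hv89
          rcases pair_cases u hu '8' '9' h
            with hc | hc
          · rw [hc]; decide
          · rw [hc]; decide
        · have hl : pvChainLoop 100 u = pvChainLoop 99 (pvChainStep u) := by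
            show (if u ≠ 1 ∧ u ≠ 89 then _ else u) = _
            rw [if_pos ⟨h1, h89⟩]
          have hr : pvChainLoop 100 v = pvChainLoop 99 (pvChainStep v) := by
            show (if v ≠ 1 ∧ v ≠ 89 then _ else v) = _
            rw [if_pos ⟨hv1, hv89⟩]
          rw [hl, hr, chainStep_congr u v h]

-- classVals / mcv lemmas
lemma mem_classVals (v u : Int) (hv : 1 ≤ v) (hz : zfree v) :
    u ∈ classVals v ↔ 1 ≤ u ∧ (PySem.Int.toChars u).Perm (PySem.Int.toChars v) := by
  unfold classVals
  constructor
  · intro hmem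
    obtain ⟨p, hp, rfl⟩ := List.mem_map.mp hmem
    have hperm : p.Perm (PySem.Int.toChars v) := PySem.List.perm_of_mem_permutations hp
    have hpnil : p ≠ [] := by
      intro hnil
      have := hperm.length_eq
      rw [hnil] at this
      exact toChars_ne_nil v hv (List.length_eq_zero_iff.mp this.symm)
    have hpdig : ∀ c ∈ p, isDig c := fun c hc =>
      toChars_isDig v hv c (hperm.mem_iff.mp hc)
    have hphead : p.head hpnil ≠ '0' := by
      intro hbad
      apply hz
      rw [← hbad]
      exact hperm.mem_iff.mp (List.head_mem hpnil)
    obtain ⟨hval1, hvalC⟩ := toChars_val p hpnil hpdig hphead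
    exact ⟨hval1, by rw [hvalC]; exact hperm⟩
  · rintro ⟨hu1, hperm⟩
    apply List.mem_map.mpr
    refine ⟨PySem.Int.toChars u, mem_permutations_of_perm _ _ hperm, val_toChars u hu1⟩

lemma self_mem_classVals (v : Int) (hv : 1 ≤ v) (hz : zfree v) : v ∈ classVals v :=
  (mem_classVals v v hv hz).mpr ⟨hv, List.Perm.refl _⟩

lemma zfree_of_perm (u v : Int) (h : (PySem.Int.toChars u).Perm (PySem.Int.toChars v))
    (hz : zfree v) : zfree u := fun hmem => hz (h.mem_iff.mp hmem)

lemma mcv_le_self (v : Int) : mcv v ≤ v := foldl_min_le_init _ _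

lemma mcv_cases (v : Int) : mcv v = v ∨ mcv v ∈ classVals v := foldl_min_cases _ _

lemma classVals_subset (u v : Int) (hu : 1 ≤ u) (hzu : zfree u) (hv : 1 ≤ v) (hzv : zfree v)
    (h : (PySem.Int.toChars u).Perm (PySem.Int.toChars v)) :
    ∀ w, w ∈ classVals u → w ∈ classVals v := by
  intro w hw
  obtain ⟨hw1, hwp⟩ := (mem_classVals u w hu hzu).mp hw
  exact (mem_classVals v w hv hzv).mpr ⟨hw1, hwp.trans h⟩

lemma mcv_congr (u v : Int) (hu : 1 ≤ u) (hzu : zfree u) (hv : 1 ≤ v) (hzv : zfree v)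
    (h : (PySem.Int.toChars u).Perm (PySem.Int.toChars v)) : mcv u = mcv v := by
  apply le_antisymm
  · rcases mcv_cases v with hc | hc
    · have : v ∈ classVals u := (mem_classVals u v hu hzu).mpr ⟨hv, h.symm⟩
      rw [hc]
      exact foldl_min_le_mem _ _ _ this
    · have : mcv v ∈ classVals u := classVals_subset v u hv hzv hu hzu h.symm _ hc
      exact foldl_min_le_mem _ _ _ this
  · rcases mcv_cases u with hc | hc
    · have : u ∈ classVals v := (mem_classVals v u hv hzv).mpr ⟨hu, h⟩
      rw [hc]
      exact foldl_min_le_mem _ _ _ this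
    · have : mcv u ∈ classVals v := classVals_subset u v hu hzu hv hzv h _ hc
      exact foldl_min_le_mem _ _ _ this

lemma mcv_pos (v : Int) (hv : 1 ≤ v) (hz : zfree v) : 1 ≤ mcv v := by
  rcases mcv_cases v with hc | hc
  · omega
  · exact ((mem_classVals v _ hv hz).mp hc).1

-- the marking loop
lemma pyGetD_nonneg_getD (xs : List Int) (u : Int) (h : 0 ≤ u) :
    PySem.List.pyGetD xs u 0 = xs.getD u.toNat 0 := by
  unfold PySem.List.pyGetD
  rw [PySem.List.pyGet?_of_nonneg _ h, List.getD_eq_getElem?_getD]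

lemma mark_fold_length (n : Int) (vs : List Int) (flags : List Int) :
    (vs.foldl (fun fl perm => if perm < n + 1 then PySem.List.pySetD fl perm 1 else fl)
      flags).length = flags.length := by
  induction vs generalizing flags with
  | nil => rfl
  | cons p t ih =>
    rw [List.foldl_cons]
    by_cases hp : p < n + 1
    · rw [if_pos hp, ih, PySem.List.length_pySetD]
    · rw [if_neg hp, ih]

lemma mark_fold (n : Int) (vs : List Int) (flags : List Int) (hvs : ∀ p ∈ vs, 0 ≤ p)
    (hlen : flags.length = (n + 1).toNat) (u : Int) (h0 : 0 ≤ u) (hun : u ≤ n) :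
    PySem.List.pyGetD
        (vs.foldl (fun fl perm => if perm < n + 1 then PySem.List.pySetD fl perm 1 else fl) flags)
        u 0
      = if u ∈ vs then 1 else PySem.List.pyGetD flags u 0 := by
  induction vs generalizing flags with
  | nil => simp
  | cons p t ih =>
    have hp0 : 0 ≤ p := hvs p List.mem_cons_self
    have ht : ∀ q ∈ t, 0 ≤ q := fun q hq => hvs q (List.mem_cons_of_mem p hq)
    rw [List.foldl_cons]
    by_cases hplt : p < n + 1
    · rw [if_pos hplt]
      have hlen1 : (PySem.List.pySetD flags p 1).length = (n + 1).toNat := by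
        rw [PySem.List.length_pySetD]; exact hlen
      rw [ih _ ht hlen1]
      by_cases hut : u ∈ t
      · rw [if_pos hut, if_pos (List.mem_cons_of_mem p hut)]
      · rw [if_neg hut]
        rw [PySem.List.pySetD_of_nonneg _ _ hp0, pyGetD_nonneg_getD _ _ h0,
          pyGetD_nonneg_getD _ _ h0, getD_set']
        by_cases hup : u = p
        · subst hup
          have hin : u.toNat = u.toNat ∧ u.toNat < flags.length := by
            constructor
            · rfl
            · rw [hlen]; omega
          rw [if_pos hin, if_pos (List.mem_cons_self)]
        · have hnin : ¬(p.toNat = u.toNat ∧ p.toNat < flags.length) := by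
            rintro ⟨heq, -⟩
            have : u = p := by omega
            exact hup this
          rw [if_neg hnin, if_neg (by
            intro hmem
            rcases List.mem_cons.mp hmem with rfl | hmem'
            · exact hup rfl
            · exact hut hmem')]
    · rw [if_neg hplt, ih _ ht hlen]
      by_cases hut : u ∈ t
      · rw [if_pos hut, if_pos (List.mem_cons_of_mem p hut)]
      · rw [if_neg hut, if_neg (by
          intro hmem
          rcases List.mem_cons.mp hmem with rfl | hmem'
          · omega
          · exact hut hmem')]

-- indF is unchanged from k to k+1 unless some u has mcv u = k+1
lemma indF_step_eq (k u : Int)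
    (hno : ¬(1 ≤ u ∧ zfree u ∧ happyB u ∧ mcv u = k + 1)) : indF (k + 1) u = indF k u := by
  unfold indF
  by_cases h2 : 1 ≤ u ∧ zfree u ∧ happyB u ∧ mcv u ≤ k
  · obtain ⟨ha, hb, hc, hd⟩ := h2
    rw [if_pos ⟨ha, hb, hc, by omega⟩, if_pos ⟨ha, hb, hc, hd⟩]
  · have hn1 : ¬(1 ≤ u ∧ zfree u ∧ happyB u ∧ mcv u ≤ k + 1) := by
      rintro ⟨ha, hb, hc, hd⟩
      have hmeq : mcv u = k + 1 := by
        by_contra hne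
        exact h2 ⟨ha, hb, hc, by omega⟩
      exact hno ⟨ha, hb, hc, hmeq⟩
    rw [if_neg hn1, if_neg h2]

-- the loop invariant
lemma inv_init (n : Int) : InvF n 0 (List.replicate (n + 1).toNat 0) := by
  constructor
  · simp
  · intro u h0 hn
    rw [pyGetD_nonneg_getD _ _ h0]
    have hrep : (List.replicate (n + 1).toNat (0 : Int)).getD u.toNat 0 = 0 := by
      by_cases h : u.toNat < (n + 1).toNat <;>
        simp [List.getD_eq_getElem?_getD, h]
    rw [hrep]
    unfold indF
    rw [if_neg]
    rintro ⟨h1, hz, hh, hm⟩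
    have := mcv_pos u h1 hz
    omega

lemma sd_iff_happy (x : Int) : squareDigit 101 x ≠ 0 ↔ happyB x := by
  rw [show (101 : Nat) = 100 + 1 from rfl, squareDigit_eq 100 x]
  unfold happyB
  by_cases hc : pvChainLoop 100 x = 1 <;> simp [hc]

lemma inv_step (n k : Int) (flags : List Int) (h : InvF n k flags)
    (hk1 : 1 ≤ k + 1) (hkn : k + 1 ≤ n) :
    InvF n (k + 1) (squareDigitList1Step n flags (k + 1)) := by
  obtain ⟨hlen, hget⟩ := h
  set b := k + 1 with hb
  have hb1 : 1 ≤ b := hk1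
  have hbn : b ≤ n := hkn
  have hdsnil := toChars_ne_nil b hb1
  have hdsdig := toChars_isDig b hb1
  obtain ⟨hd, tl, hds⟩ : ∃ hd tl, PySem.Int.toChars b = hd :: tl := by
    cases hcs : PySem.Int.toChars b with
    | nil => exact absurd hcs hdsnil
    | cons x xs => exact ⟨x, xs, rfl⟩
  have hhd : hd ≠ '0' := toChars_head_ne_zero b hb1 hd (by rw [hds]; rfl)
  set num := pvCharsVal ((PySem.Int.toChars b).filter (fun d => d != '0')) with hnum
  have hstep : squareDigitList1Step n flags b =
      if squareDigit 101 num ≠ 0 ∧ PySem.List.pyGetD flags num 0 = 0 then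
        ((PySem.List.permutations (PySem.Int.toChars num) (PySem.Int.toChars num).length
          ++ PySem.List.permutations (PySem.Int.toChars b) (PySem.Int.toChars b).length).map
            (fun p => pvCharsVal p)).foldl
          (fun fl perm => if perm < n + 1 then PySem.List.pySetD fl perm 1 else fl) flags
      else flags := rfl
  -- an unchanged flags array still satisfies the invariant for k+1 when nothing of
  -- minimal-class-value k+1 exists
  have hunch : (∀ u : Int, ¬(1 ≤ u ∧ zfree u ∧ happyB u ∧ mcv u = b)) →
      InvF n (k + 1) flags := by
    intro hno
    refine ⟨hlen, fun u h0 hn => ?_⟩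
    rw [hget u h0 hn]
    exact (indF_step_eq k u (hno u)).symm
  by_cases hzb : zfree b
  · -- b is zero-free: num = b
    have hfilter : (PySem.Int.toChars b).filter (fun d => d != '0') = PySem.Int.toChars b := by
      apply List.filter_eq_self.mpr
      intro c hc
      simp only [bne_iff_ne, ne_eq]
      exact fun hc0 => hzb (hc0 ▸ hc)
    have hnumb : num = b := by rw [hnum, hfilter, val_toChars b hb1]
    by_cases hhb : happyB b
    · by_cases hmb : mcv b ≤ k
      · -- already flagged: skip
        have hfb : PySem.List.pyGetD flags b 0 = 1 := by
          rw [hget b (by omega) hbn]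
          unfold indF
          rw [if_pos ⟨hb1, hzb, hhb, by omega⟩]
        have hcond : ¬(squareDigit 101 num ≠ 0 ∧ PySem.List.pyGetD flags num 0 = 0) := by
          rw [hnumb]
          rintro ⟨-, hz2⟩
          rw [hfb] at hz2
          exact one_ne_zero hz2
        rw [hstep, if_neg hcond]
        apply hunch
        intro u
        rintro ⟨hu1, hzu, hhu, hmu⟩
        rcases mcv_cases u with hcu | hcu
        · have hub : u = b := by omega
          have hmm : mcv b = b := hub ▸ hmu
          omega
        · rw [hmu] at hcu
          obtain ⟨-, hpm⟩ := (mem_classVals u b hu1 hzu).mp hcu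
          have := mcv_congr u b hu1 hzu hb1 hzb hpm.symm
          omega
      · -- process b and mark its whole permutation class
        have hfb0 : PySem.List.pyGetD flags b 0 = 0 := by
          rw [hget b (by omega) hbn]
          unfold indF
          rw [if_neg]
          rintro ⟨-, -, -, hm⟩
          exact hmb hm
        have hcond : squareDigit 101 num ≠ 0 ∧ PySem.List.pyGetD flags num 0 = 0 :=
          ⟨(sd_iff_happy num).mpr (by rw [hnumb]; exact hhb), by rw [hnumb]; exact hfb0⟩
        rw [hstep, if_pos hcond, hnumb]
        set vals := ((PySem.List.permutations (PySem.Int.toChars b) (PySem.Int.toChars b).length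
          ++ PySem.List.permutations (PySem.Int.toChars b) (PySem.Int.toChars b).length).map
            (fun p => pvCharsVal p)) with hvals
        have hvals_mem : ∀ w : Int, w ∈ vals ↔ w ∈ classVals b := by
          intro w
          rw [hvals]
          unfold classVals
          simp [List.mem_append, List.mem_map]
        have hvals_nonneg : ∀ p ∈ vals, 0 ≤ p := by
          intro p hp
          have := ((mem_classVals b p hb1 hzb).mp ((hvals_mem p).mp hp)).1
          omega
        constructor
        · rw [mark_fold_length]; exact hlen
        · intro u h0 hn
          rw [mark_fold n vals flags hvals_nonneg hlen u h0 hn]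
          by_cases hu : u ∈ vals
          · rw [if_pos hu]
            obtain ⟨hu1, hup⟩ := (mem_classVals b u hb1 hzb).mp ((hvals_mem u).mp hu)
            unfold indF
            rw [if_pos ⟨hu1, zfree_of_perm u b hup hzb,
              (happy_congr u b hu1 hb1 hup).mpr hhb, by
                rw [mcv_congr u b hu1 (zfree_of_perm u b hup hzb) hb1 hzb hup]
                exact mcv_le_self b⟩]
          · rw [if_neg hu, hget u h0 hn]
            refine (indF_step_eq k u ?_).symm
            rintro ⟨hu1, hzu, hhu, hmu⟩
            rcases mcv_cases u with hcu | hcu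
            · have hub : u = b := by omega
              refine hu ((hvals_mem u).mpr ?_)
              rw [hub]
              exact self_mem_classVals b hb1 (hub ▸ hzu)
            · rw [hmu] at hcu
              obtain ⟨-, hpm⟩ := (mem_classVals u b hu1 hzu).mp hcu
              exact hu ((hvals_mem u).mpr ((mem_classVals b u hb1 hzb).mpr ⟨hu1, hpm.symm⟩))
    · -- b not happy: skip
      have hcond : ¬(squareDigit 101 num ≠ 0 ∧ PySem.List.pyGetD flags num 0 = 0) := by
        rintro ⟨hs, -⟩
        rw [hnumb] at hs
        exact hhb ((sd_iff_happy b).mp hs)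
      rw [hstep, if_neg hcond]
      apply hunch
      intro u
      rintro ⟨hu1, hzu, hhu, hmu⟩
      rcases mcv_cases u with hcu | hcu
      · have hub : u = b := by omega
        exact hhb (hub ▸ hhu)
      · rw [hmu] at hcu
        obtain ⟨-, hpm⟩ := (mem_classVals u b hu1 hzu).mp hcu
        exact hhb ((happy_congr u b hu1 hb1 hpm.symm).mp hhu)
  · -- b contains a digit 0: its zero-stripped value num < b is already flagged (or unhappy)
    have hz0 : '0' ∈ PySem.Int.toChars b := not_not.mp hzb
    set ds' := (PySem.Int.toChars b).filter (fun d => d != '0') with hds'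
    have hds'cons : ds' = hd :: tl.filter (fun d => d != '0') := by
      rw [hds', hds, List.filter_cons, if_pos (by simpa using hhd)]
    have hds'nil : ds' ≠ [] := by rw [hds'cons]; simp
    have hds'dig : ∀ c ∈ ds', isDig c := fun c hc =>
      hdsdig c (List.mem_of_mem_filter hc)
    have hds'head : ds'.head hds'nil ≠ '0' := by
      have hq : ds'.head? = some hd := by rw [hds'cons]; rfl
      rw [List.head?_eq_some_head hds'nil] at hq
      rw [Option.some_inj.mp hq]
      exact hhd
    obtain ⟨hnum1, hnumC⟩ := toChars_val ds' hds'nil hds'dig hds'head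
    have hnum1' : 1 ≤ num := by rw [hnum]; exact hnum1
    have hnumC' : PySem.Int.toChars num = ds' := by rw [hnum]; exact hnumC
    have hznum : zfree num := by
      intro hmem
      rw [hnumC', hds'] at hmem
      simp at hmem
    have hltlen : ds'.length < (PySem.Int.toChars b).length := by
      rw [hds']
      exact List.length_filter_lt_length_iff_exists.mpr ⟨'0', hz0, by simp⟩
    have hlt : num < b := by
      have h1 : pvCharsVal ds' < 10 ^ ds'.length := val_lt ds' hds'dig
      have h3 : (10 : Int) ^ ((PySem.Int.toChars b).length - 1) ≤ b := le_of_toChars_len b hb1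
      have h4 : (10 : Int) ^ ds'.length ≤ 10 ^ ((PySem.Int.toChars b).length - 1) := by
        apply pow_le_pow_right₀ (by norm_num)
        omega
      rw [hnum]
      omega
    have hno : ∀ u : Int, ¬(1 ≤ u ∧ zfree u ∧ happyB u ∧ mcv u = b) := by
      intro u
      rintro ⟨hu1, hzu, hhu, hmu⟩
      rcases mcv_cases u with hcu | hcu
      · have hub : u = b := by omega
        exact hzb (hub ▸ hzu)
      · rw [hmu] at hcu
        obtain ⟨-, hpm⟩ := (mem_classVals u b hu1 hzu).mp hcu
        exact hzu (hpm.mem_iff.mp hz0)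
    by_cases hhn : happyB num
    · have hf1 : PySem.List.pyGetD flags num 0 = 1 := by
        rw [hget num (by omega) (by omega)]
        unfold indF
        rw [if_pos ⟨hnum1', hznum, hhn, by
          have := mcv_le_self num
          omega⟩]
      have hcond : ¬(squareDigit 101 num ≠ 0 ∧ PySem.List.pyGetD flags num 0 = 0) := by
        rintro ⟨-, hz2⟩
        rw [hf1] at hz2
        exact one_ne_zero hz2
      rw [hstep, if_neg hcond]
      exact hunch hno
    · have hcond : ¬(squareDigit 101 num ≠ 0 ∧ PySem.List.pyGetD flags num 0 = 0) := by
        rintro ⟨hs, -⟩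
        exact hhn ((sd_iff_happy num).mp hs)
      rw [hstep, if_neg hcond]
      exact hunch hno

lemma inv_loop (n : Int) (j : Nat) (hj : (j : Int) ≤ n) :
    InvF n j ((PySem.List.pyRange 1 ((j : Int) + 1) 1).foldl (squareDigitList1Step n)
      (List.replicate (n + 1).toNat 0)) := by
  induction j with
  | zero =>
    rw [show (((0 : Nat) : Int) + 1) = 1 from by norm_num,
      PySem.List.pyRange_one_eq_nil (by norm_num), List.foldl_nil]
    have h := inv_init n
    simpa using h
  | succ j ih =>
    have hj' : (j : Int) ≤ n := by push_cast at hj ⊢; omega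
    have hcast : ((j + 1 : Nat) : Int) = (j : Int) + 1 := by push_cast; ring
    rw [hcast, PySem.List.pyRange_one_succ_right (by omega), List.foldl_append,
      List.foldl_cons, List.foldl_nil]
    exact inv_step n (j : Int) _ (ih hj') (by omega) (by push_cast at hj; omega)

lemma alt_eq_sum (n : Int) :
    square_digit_list_1_alt n
      = ((PySem.List.pyRange 1 (n + 1) 1).map
          (fun m => if zfree m ∧ happyB m then (1 : Int) else 0)).sum := by
  suffices haux : ∀ (l : List Int) (a : Int),
      l.foldl (fun count m =>
        if (PySem.Int.toChars m).contains '0' then count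
        else if pvChainLoop 100 m = 1 then count + 1 else count) a
      = a + (l.map (fun m => if zfree m ∧ happyB m then (1 : Int) else 0)).sum by
    unfold square_digit_list_1_alt
    rw [haux, zero_add]
  intro l
  induction l with
  | nil => intro a; simp
  | cons m t ih =>
    intro a
    rw [List.foldl_cons, ih, List.map_cons, List.sum_cons]
    by_cases hz : zfree m
    · have hcont : (PySem.Int.toChars m).contains '0' = false := by simpa using hz
      by_cases hh : happyB m
      · have hh' : pvChainLoop 100 m = 1 := hh
        rw [hcont, if_neg Bool.false_ne_true, if_pos hh', if_pos ⟨hz, hh⟩]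
        ring
      · have hh' : ¬ pvChainLoop 100 m = 1 := hh
        rw [hcont, if_neg Bool.false_ne_true, if_neg hh', if_neg (fun hc => hh hc.2)]
        ring
    · have hcont : (PySem.Int.toChars m).contains '0' = true := by
        simpa using not_not.mp hz
      rw [hcont, if_pos rfl, if_neg (fun hc => hz hc.1)]
      ring

-- ===== VERDICT (by name: the statement is the Claim_ definition above) =====
theorem square_digit_list_1_spec : Claim_equal_square_digit_list_1 := by
  unfold Claim_equal_square_digit_list_1 Spec_square_digit_list_1
  intro n _
  by_cases hn : 0 ≤ n
  · have hloop := inv_loop n n.toNat (by omega)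
    rw [Int.toNat_of_nonneg hn] at hloop
    obtain ⟨hlenN, hgetN⟩ := hloop
    show square_digit_list_1 n = _
    unfold square_digit_list_1
    set fl := (PySem.List.pyRange 1 (n + 1) 1).foldl (squareDigitList1Step n)
      (List.replicate (n + 1).toNat 0) with hfl
    have hsum : fl.foldl (· + ·) 0 = ((List.range fl.length).map (fun i => fl.getD i 0)).sum := by
      conv_rhs => rw [← eq_map_getD fl]
      rw [foldl_add_eq_sum, zero_add]
    have hlen' : fl.length = n.toNat + 1 := by rw [hlenN]; omega
    have hA : fl.foldl (· + ·) 0 = ((List.range n.toNat).map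
        (fun j : Nat => if zfree ((j : Int) + 1) ∧ happyB ((j : Int) + 1) then (1 : Int) else 0)).sum := by
      rw [hsum, hlen', List.range_succ_eq_map, List.map_cons, List.sum_cons, List.map_map]
      have h00 : fl.getD 0 0 = 0 := by
        have h0g := hgetN 0 (le_refl 0) hn
        rw [pyGetD_nonneg_getD _ _ (le_refl 0)] at h0g
        rw [show ((0 : Int)).toNat = 0 from rfl] at h0g
        rw [h0g]
        unfold indF
        rw [if_neg]
        rintro ⟨h1, -, -, -⟩
        omega
      rw [h00, zero_add]
      apply congrArg
      apply List.map_congr_left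
      intro j hj
      have hjr : j < n.toNat := List.mem_range.mp hj
      have hjn : (j : Int) + 1 ≤ n := by omega
      have hcomp : fl.getD (j + 1) 0 = indF n ((j : Int) + 1) := by
        have hg := hgetN ((j : Int) + 1) (by omega) hjn
        rw [pyGetD_nonneg_getD _ _ (by omega)] at hg
        rw [show ((j : Int) + 1).toNat = j + 1 from by omega] at hg
        exact hg
      show fl.getD (Nat.succ j) 0 = _
      rw [show Nat.succ j = j + 1 from rfl, hcomp]
      unfold indF
      by_cases hcase : zfree ((j : Int) + 1) ∧ happyB ((j : Int) + 1)
      · rw [if_pos ⟨by omega, hcase.1, hcase.2, le_trans (mcv_le_self _) hjn⟩, if_pos hcase]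
      · rw [if_neg (fun hctr => hcase ⟨hctr.2.1, hctr.2.2.1⟩), if_neg hcase]
    have hB : square_digit_list_1_alt n = ((List.range n.toNat).map
        (fun j : Nat => if zfree ((j : Int) + 1) ∧ happyB ((j : Int) + 1) then (1 : Int) else 0)).sum := by
      rw [alt_eq_sum n, PySem.List.pyRange_one, show ((n + 1) - 1 : Int) = n from by ring,
        List.map_map]
      apply congrArg
      apply List.map_congr_left
      intro j hj
      show (if zfree (1 + (j : Int)) ∧ happyB (1 + (j : Int)) then (1 : Int) else 0) = _
      rw [show (1 + (j : Int)) = (j : Int) + 1 from by ring]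
    rw [hA, hB]
  · show square_digit_list_1 n = _
    unfold square_digit_list_1 square_digit_list_1_alt
    rw [PySem.List.pyRange_one_eq_nil (by omega), List.foldl_nil, List.foldl_nil,
      show (n + 1).toNat = 0 from by omega]
    rfl
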